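-- pv_equiv track=rewrite | github.com/clarkshaeffer/sudoku | sudoku_lib.py | getSquareList
-- ===== SOURCE A (Python) =====
-- def getRows(sud):
--     return int(len(sud) / 9)
--
-- def getCols(sud):
--     return len(sud) % 9
--
-- def getSquareList(sud, sq):
--     rows = getRows(sud)
--     cols = getCols(sud)
--     squareList = []
--     if sq == 0:
--         for i in range(len(sud)):
--             if int(i / 9) <= 2:
--                 if i % 9 <= 2:
--                     squareList.append(sud[i])
--     elif sq == 1:
--         for i in range(len(sud)):
--             if int(i / 9) <= 2:
--                 if i % 9 >= 3 and i % 9 <= 5: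
--                     squareList.append(sud[i])
--     elif sq == 2:
--         for i in range(len(sud)):
--             if int(i / 9) <= 2:
--                 if i % 9 >= 6 and i % 9 <= 8:
--                     squareList.append(sud[i])
--     elif sq == 3:
--         for i in range(len(sud)):
--             if int(i / 9) >= 3 and int(i / 9) <= 5:
--                 if i % 9 <= 2:
--                     squareList.append(sud[i])
--     elif sq == 4:
--         for i in range(len(sud)):
--             if int(i / 9) >= 3 and int(i / 9) <= 5:
--                 if i % 9 >= 3 and i % 9 <= 5:
--                     squareList.append(sud[i])
--     elif sq == 5:
--         for i in range(len(sud)):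
--             if int(i / 9) >= 3 and int(i / 9) <= 5:
--                 if i % 9 >= 6 and i % 9 <= 8:
--                     squareList.append(sud[i])
--     elif sq == 6:
--         for i in range(len(sud)):
--             if int(i / 9) >= 6 and int(i / 9) <= 8:
--                 if i % 9 <= 2:
--                     squareList.append(sud[i])
--     elif sq == 7:
--         for i in range(len(sud)):
--             if int(i / 9) >= 6 and int(i / 9) <= 8:
--                 if i % 9 >= 3 and i % 9 <= 5:
--                     squareList.append(sud[i])
--     elif sq == 8:
--         for i in range(len(sud)):
--             if int(i / 9) >= 6 and int(i / 9) <= 8: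
--                 if i % 9 >= 6 and i % 9 <= 8:
--                     squareList.append(sud[i])
--     return squareList
-- ===== SOURCE B (Python) =====
-- def getSquareList(sud, sq):
--     if not (0 <= sq <= 8):
--         return []
--     base = 27 * (sq // 3) + 3 * (sq % 3)
--     return [sud[base + 9 * r + c]
--             for r in range(3) for c in range(3)
--             if base + 9 * r + c < len(sud)]
-- ===== Notes on version B (the rewrite author's own statement) =====
-- stated objective: alternative
-- what changed: B computes the nine block cell indices directly from sq (base = 27*(sq//3)+3*(sq%3)) and reads only those cells guarded by idx < len(sud), instead of A's per-square scan over every index of the list with row/column tests.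
import Mathlib
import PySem

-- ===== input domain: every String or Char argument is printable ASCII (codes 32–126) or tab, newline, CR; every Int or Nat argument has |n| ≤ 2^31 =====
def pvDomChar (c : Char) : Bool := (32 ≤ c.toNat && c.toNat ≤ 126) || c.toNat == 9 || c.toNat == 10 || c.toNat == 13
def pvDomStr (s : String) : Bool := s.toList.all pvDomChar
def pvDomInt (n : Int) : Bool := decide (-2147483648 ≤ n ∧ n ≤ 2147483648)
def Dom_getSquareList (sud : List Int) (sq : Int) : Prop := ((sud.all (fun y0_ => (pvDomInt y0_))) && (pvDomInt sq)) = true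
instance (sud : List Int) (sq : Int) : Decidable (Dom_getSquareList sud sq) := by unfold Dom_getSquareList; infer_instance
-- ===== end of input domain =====

-- B enumerates the ≤ 9 block cell indices directly from sq and reads only those cells, instead of A's scan over every index of the list; objective: alternative.

-- ===== PORT A =====
-- int(i/9) is exact as truncdiv for the nonnegative in-range i the loops produce; sud[i] is
-- ported as pyGetD with default 0, never used since i < len(sud) inside range(len(sud)).
def getSquareList (sud : List Int) (sq : Int) : List Int :=
  let _rows : Int := PySem.Int.truncdiv (sud.length : Int) 9      -- rows = getRows(sud)  (unused, as in A)
  let _cols : Int := PySem.Int.mod (sud.length : Int) 9           -- cols = getCols(sud)  (unused, as in A)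
  if sq = 0 then
    (PySem.List.pyRange 0 (sud.length : Int) 1).foldl (fun acc i =>
      if PySem.Int.truncdiv i 9 ≤ 2 then
        (if PySem.Int.mod i 9 ≤ 2 then acc ++ [PySem.List.pyGetD sud i 0] else acc)
      else acc) []
  else if sq = 1 then
    (PySem.List.pyRange 0 (sud.length : Int) 1).foldl (fun acc i =>
      if PySem.Int.truncdiv i 9 ≤ 2 then
        (if 3 ≤ PySem.Int.mod i 9 ∧ PySem.Int.mod i 9 ≤ 5 then acc ++ [PySem.List.pyGetD sud i 0] else acc)
      else acc) []
  else if sq = 2 then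
    (PySem.List.pyRange 0 (sud.length : Int) 1).foldl (fun acc i =>
      if PySem.Int.truncdiv i 9 ≤ 2 then
        (if 6 ≤ PySem.Int.mod i 9 ∧ PySem.Int.mod i 9 ≤ 8 then acc ++ [PySem.List.pyGetD sud i 0] else acc)
      else acc) []
  else if sq = 3 then
    (PySem.List.pyRange 0 (sud.length : Int) 1).foldl (fun acc i =>
      if 3 ≤ PySem.Int.truncdiv i 9 ∧ PySem.Int.truncdiv i 9 ≤ 5 then
        (if PySem.Int.mod i 9 ≤ 2 then acc ++ [PySem.List.pyGetD sud i 0] else acc)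
      else acc) []
  else if sq = 4 then
    (PySem.List.pyRange 0 (sud.length : Int) 1).foldl (fun acc i =>
      if 3 ≤ PySem.Int.truncdiv i 9 ∧ PySem.Int.truncdiv i 9 ≤ 5 then
        (if 3 ≤ PySem.Int.mod i 9 ∧ PySem.Int.mod i 9 ≤ 5 then acc ++ [PySem.List.pyGetD sud i 0] else acc)
      else acc) []
  else if sq = 5 then
    (PySem.List.pyRange 0 (sud.length : Int) 1).foldl (fun acc i =>
      if 3 ≤ PySem.Int.truncdiv i 9 ∧ PySem.Int.truncdiv i 9 ≤ 5 then
        (if 6 ≤ PySem.Int.mod i 9 ∧ PySem.Int.mod i 9 ≤ 8 then acc ++ [PySem.List.pyGetD sud i 0] else acc)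
      else acc) []
  else if sq = 6 then
    (PySem.List.pyRange 0 (sud.length : Int) 1).foldl (fun acc i =>
      if 6 ≤ PySem.Int.truncdiv i 9 ∧ PySem.Int.truncdiv i 9 ≤ 8 then
        (if PySem.Int.mod i 9 ≤ 2 then acc ++ [PySem.List.pyGetD sud i 0] else acc)
      else acc) []
  else if sq = 7 then
    (PySem.List.pyRange 0 (sud.length : Int) 1).foldl (fun acc i =>
      if 6 ≤ PySem.Int.truncdiv i 9 ∧ PySem.Int.truncdiv i 9 ≤ 8 then
        (if 3 ≤ PySem.Int.mod i 9 ∧ PySem.Int.mod i 9 ≤ 5 then acc ++ [PySem.List.pyGetD sud i 0] else acc)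
      else acc) []
  else if sq = 8 then
    (PySem.List.pyRange 0 (sud.length : Int) 1).foldl (fun acc i =>
      if 6 ≤ PySem.Int.truncdiv i 9 ∧ PySem.Int.truncdiv i 9 ≤ 8 then
        (if 6 ≤ PySem.Int.mod i 9 ∧ PySem.Int.mod i 9 ≤ 8 then acc ++ [PySem.List.pyGetD sud i 0] else acc)
      else acc) []
  else []

-- ===== PORT B =====
-- the list comprehension over r,c in range(3) with its 'if' filter is ported as nested flatMap
-- over pyRange 0 3 1 with an if-singleton; sud[idx] as pyGetD (idx is in range when the guard holds).
def getSquareList_alt (sud : List Int) (sq : Int) : List Int :=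
  if 0 ≤ sq ∧ sq ≤ 8 then
    let base : Int := 27 * PySem.Int.floordiv sq 3 + 3 * PySem.Int.mod sq 3
    (PySem.List.pyRange 0 3 1).flatMap (fun r =>
      (PySem.List.pyRange 0 3 1).flatMap (fun c =>
        if base + 9 * r + c < (sud.length : Int) then [PySem.List.pyGetD sud (base + 9 * r + c) 0] else []))
  else []

-- ===== PRECONDITION & SPEC =====
def Spec_getSquareList (sud : List Int) (sq : Int) (out : List Int) : Prop := out = getSquareList_alt sud sq
instance (sud : List Int) (sq : Int) (out : List Int) : Decidable (Spec_getSquareList sud sq out) := by unfold Spec_getSquareList; infer_instance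

-- ===== CLAIM (what is proved, stated in full; the proofs are below) =====
def Claim_equal_getSquareList : Prop := ∀ (sud : List Int) (sq : Int), Dom_getSquareList sud sq → Spec_getSquareList sud sq (getSquareList sud sq)

-- ===== LEMMAS AND PROOFS =====

-- truncation and floor division agree on nonnegative dividends
lemma truncdiv_nonneg_eq (i : Int) (h : 0 ≤ i) : PySem.Int.truncdiv i 9 = i / 9 := by
  simp [PySem.Int.truncdiv, Int.tdiv_eq_ediv_of_nonneg h]

lemma pyRange_0_3 : PySem.List.pyRange 0 3 1 = [0, 1, 2] := by decide


lemma foldl_two_ifs {α β : Type} (P Q : α → Prop) [DecidablePred P] [DecidablePred Q] (f : α → β) (l : List α) :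
    l.foldl (fun acc x => if P x then (if Q x then acc ++ [f x] else acc) else acc) []
      = (l.filter (fun x => decide (P x) && decide (Q x))).map f := by
  have h : (fun (acc : List β) x => if P x then (if Q x then acc ++ [f x] else acc) else acc)
      = (fun (acc : List β) x => if (fun x => decide (P x) && decide (Q x)) x = true then acc ++ [f x] else acc) := by
    funext acc x; by_cases hP : P x <;> by_cases hQ : Q x <;> simp [hP, hQ]
  rw [h, PySem.List.foldl_append_if]
  simp

lemma filter_pyRange_eq (p : Int → Bool) (hp : ∀ i : Int, 81 ≤ i → p i = false) (n : Int) (hn : 0 ≤ n) :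
    (PySem.List.pyRange 0 n 1).filter p
      = ((PySem.List.pyRange 0 81 1).filter p).filter (fun i => decide (i < n)) := by
  by_cases h : n ≤ 81
  · rw [List.filter_comm]
    congr 1
    rw [PySem.List.pyRange_one_append 0 n 81 hn h, List.filter_append]
    have h1 : (PySem.List.pyRange 0 n 1).filter (fun i => decide (i < n)) = PySem.List.pyRange 0 n 1 :=
      List.filter_eq_self.mpr (fun a ha => by
        have := (PySem.List.mem_pyRange_one.mp ha).2; simpa)
    have h2 : (PySem.List.pyRange n 81 1).filter (fun i => decide (i < n)) = [] :=
      List.filter_eq_nil_iff.mpr (fun a ha => by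
        have := (PySem.List.mem_pyRange_one.mp ha).1; simpa)
    rw [h1, h2, List.append_nil]
  · rw [PySem.List.pyRange_one_append 0 81 n (by norm_num) (by omega), List.filter_append]
    have h2 : (PySem.List.pyRange 81 n 1).filter p = [] :=
      List.filter_eq_nil_iff.mpr (fun a ha => by
        have := (PySem.List.mem_pyRange_one.mp ha).1
        simp [hp a (by omega)])
    have h3 : ((PySem.List.pyRange 0 81 1).filter p).filter (fun i => decide (i < n)) = (PySem.List.pyRange 0 81 1).filter p :=
      List.filter_eq_self.mpr (fun a ha => by
        have := (PySem.List.mem_pyRange_one.mp (List.mem_of_mem_filter ha)).2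
        simp; omega)
    rw [h2, h3, List.append_nil]

lemma filter_map_flatMap {α β : Type} (Q : α → Prop) [DecidablePred Q] (f : α → β) (l : List α) :
    (l.filter (fun x => decide (Q x))).map f = l.flatMap (fun x => if Q x then [f x] else []) := by
  induction l with
  | nil => rfl
  | cons a l ih => by_cases h : Q a <;> simp [h, ih]

lemma A_side (sud : List Int) (P Q : Int → Prop) [DecidablePred P] [DecidablePred Q] (idxs : List Int)
    (h : (PySem.List.pyRange 0 81 1).filter (fun i => decide (P i) && decide (Q i)) = idxs)
    (hp : ∀ i : Int, 81 ≤ i → ¬(P i ∧ Q i)) :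
    (PySem.List.pyRange 0 (sud.length : Int) 1).foldl (fun acc i =>
        if P i then (if Q i then acc ++ [PySem.List.pyGetD sud i 0] else acc) else acc) []
      = idxs.flatMap (fun k => if k < (sud.length : Int) then [PySem.List.pyGetD sud k 0] else []) := by
  rw [foldl_two_ifs,
      filter_pyRange_eq _ (fun i hi => by
        rcases Classical.em (P i) with hP | hP
        · simpa [hP] using fun hQ => hp i hi ⟨hP, hQ⟩
        · simp [hP]) _ (Int.natCast_nonneg _),
      h]
  exact filter_map_flatMap (fun k : Int => k < (sud.length : Int)) _ _

-- ===== VERDICT (by name: the statement is the Claim_ definition above) =====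
theorem getSquareList_spec : Claim_equal_getSquareList := by
  intro sud sq _
  unfold Spec_getSquareList getSquareList
  by_cases h0 : sq = 0
  · subst h0
    norm_num only
    rw [A_side sud (fun i => PySem.Int.truncdiv i 9 ≤ 2) (fun i => PySem.Int.mod i 9 ≤ 2) ([0,1,2,9,10,11,18,19,20] : List Int) (by decide)
        (fun i hi hc => by
          have ht := truncdiv_nonneg_eq i (by omega)
          have hrow := hc.1
          simp only [ht] at hrow
          omega)]
    have hb : (27 * PySem.Int.floordiv 0 3 + 3 * PySem.Int.mod 0 3 : Int) = 0 := by decide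
    simp only [getSquareList_alt, pyRange_0_3, hb, if_pos (by norm_num : (0:Int) ≤ 0 ∧ (0:Int) ≤ 8)]
    norm_num [List.flatMap]
  by_cases h1 : sq = 1
  · subst h1
    norm_num only
    rw [A_side sud (fun i => PySem.Int.truncdiv i 9 ≤ 2) (fun i => 3 ≤ PySem.Int.mod i 9 ∧ PySem.Int.mod i 9 ≤ 5) ([3,4,5,12,13,14,21,22,23] : List Int) (by decide)
        (fun i hi hc => by
          have ht := truncdiv_nonneg_eq i (by omega)
          have hrow := hc.1
          simp only [ht] at hrow
          omega)]
    have hb : (27 * PySem.Int.floordiv 1 3 + 3 * PySem.Int.mod 1 3 : Int) = 3 := by decide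
    simp only [getSquareList_alt, pyRange_0_3, hb, if_pos (by norm_num : (0:Int) ≤ 1 ∧ (1:Int) ≤ 8)]
    norm_num [List.flatMap]
  by_cases h2 : sq = 2
  · subst h2
    norm_num only
    rw [A_side sud (fun i => PySem.Int.truncdiv i 9 ≤ 2) (fun i => 6 ≤ PySem.Int.mod i 9 ∧ PySem.Int.mod i 9 ≤ 8) ([6,7,8,15,16,17,24,25,26] : List Int) (by decide)
        (fun i hi hc => by
          have ht := truncdiv_nonneg_eq i (by omega)
          have hrow := hc.1
          simp only [ht] at hrow
          omega)]
    have hb : (27 * PySem.Int.floordiv 2 3 + 3 * PySem.Int.mod 2 3 : Int) = 6 := by decide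
    simp only [getSquareList_alt, pyRange_0_3, hb, if_pos (by norm_num : (0:Int) ≤ 2 ∧ (2:Int) ≤ 8)]
    norm_num [List.flatMap]
  by_cases h3 : sq = 3
  · subst h3
    norm_num only
    rw [A_side sud (fun i => 3 ≤ PySem.Int.truncdiv i 9 ∧ PySem.Int.truncdiv i 9 ≤ 5) (fun i => PySem.Int.mod i 9 ≤ 2) ([27,28,29,36,37,38,45,46,47] : List Int) (by decide)
        (fun i hi hc => by
          have ht := truncdiv_nonneg_eq i (by omega)
          have hrow := hc.1
          simp only [ht] at hrow
          omega)]
    have hb : (27 * PySem.Int.floordiv 3 3 + 3 * PySem.Int.mod 3 3 : Int) = 27 := by decide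
    simp only [getSquareList_alt, pyRange_0_3, hb, if_pos (by norm_num : (0:Int) ≤ 3 ∧ (3:Int) ≤ 8)]
    norm_num [List.flatMap]
  by_cases h4 : sq = 4
  · subst h4
    norm_num only
    rw [A_side sud (fun i => 3 ≤ PySem.Int.truncdiv i 9 ∧ PySem.Int.truncdiv i 9 ≤ 5) (fun i => 3 ≤ PySem.Int.mod i 9 ∧ PySem.Int.mod i 9 ≤ 5) ([30,31,32,39,40,41,48,49,50] : List Int) (by decide)
        (fun i hi hc => by
          have ht := truncdiv_nonneg_eq i (by omega)
          have hrow := hc.1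
          simp only [ht] at hrow
          omega)]
    have hb : (27 * PySem.Int.floordiv 4 3 + 3 * PySem.Int.mod 4 3 : Int) = 30 := by decide
    simp only [getSquareList_alt, pyRange_0_3, hb, if_pos (by norm_num : (0:Int) ≤ 4 ∧ (4:Int) ≤ 8)]
    norm_num [List.flatMap]
  by_cases h5 : sq = 5
  · subst h5
    norm_num only
    rw [A_side sud (fun i => 3 ≤ PySem.Int.truncdiv i 9 ∧ PySem.Int.truncdiv i 9 ≤ 5) (fun i => 6 ≤ PySem.Int.mod i 9 ∧ PySem.Int.mod i 9 ≤ 8) ([33,34,35,42,43,44,51,52,53] : List Int) (by decide)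
        (fun i hi hc => by
          have ht := truncdiv_nonneg_eq i (by omega)
          have hrow := hc.1
          simp only [ht] at hrow
          omega)]
    have hb : (27 * PySem.Int.floordiv 5 3 + 3 * PySem.Int.mod 5 3 : Int) = 33 := by decide
    simp only [getSquareList_alt, pyRange_0_3, hb, if_pos (by norm_num : (0:Int) ≤ 5 ∧ (5:Int) ≤ 8)]
    norm_num [List.flatMap]
  by_cases h6 : sq = 6
  · subst h6
    norm_num only
    rw [A_side sud (fun i => 6 ≤ PySem.Int.truncdiv i 9 ∧ PySem.Int.truncdiv i 9 ≤ 8) (fun i => PySem.Int.mod i 9 ≤ 2) ([54,55,56,63,64,65,72,73,74] : List Int) (by decide)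
        (fun i hi hc => by
          have ht := truncdiv_nonneg_eq i (by omega)
          have hrow := hc.1
          simp only [ht] at hrow
          omega)]
    have hb : (27 * PySem.Int.floordiv 6 3 + 3 * PySem.Int.mod 6 3 : Int) = 54 := by decide
    simp only [getSquareList_alt, pyRange_0_3, hb, if_pos (by norm_num : (0:Int) ≤ 6 ∧ (6:Int) ≤ 8)]
    norm_num [List.flatMap]
  by_cases h7 : sq = 7
  · subst h7
    norm_num only
    rw [A_side sud (fun i => 6 ≤ PySem.Int.truncdiv i 9 ∧ PySem.Int.truncdiv i 9 ≤ 8) (fun i => 3 ≤ PySem.Int.mod i 9 ∧ PySem.Int.mod i 9 ≤ 5) ([57,58,59,66,67,68,75,76,77] : List Int) (by decide)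
        (fun i hi hc => by
          have ht := truncdiv_nonneg_eq i (by omega)
          have hrow := hc.1
          simp only [ht] at hrow
          omega)]
    have hb : (27 * PySem.Int.floordiv 7 3 + 3 * PySem.Int.mod 7 3 : Int) = 57 := by decide
    simp only [getSquareList_alt, pyRange_0_3, hb, if_pos (by norm_num : (0:Int) ≤ 7 ∧ (7:Int) ≤ 8)]
    norm_num [List.flatMap]
  by_cases h8 : sq = 8
  · subst h8
    norm_num only
    rw [A_side sud (fun i => 6 ≤ PySem.Int.truncdiv i 9 ∧ PySem.Int.truncdiv i 9 ≤ 8) (fun i => 6 ≤ PySem.Int.mod i 9 ∧ PySem.Int.mod i 9 ≤ 8) ([60,61,62,69,70,71,78,79,80] : List Int) (by decide)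
        (fun i hi hc => by
          have ht := truncdiv_nonneg_eq i (by omega)
          have hrow := hc.1
          simp only [ht] at hrow
          omega)]
    have hb : (27 * PySem.Int.floordiv 8 3 + 3 * PySem.Int.mod 8 3 : Int) = 60 := by decide
    simp only [getSquareList_alt, pyRange_0_3, hb, if_pos (by norm_num : (0:Int) ≤ 8 ∧ (8:Int) ≤ 8)]
    norm_num [List.flatMap]
  · -- sq outside 0..8: both sides are []
    rw [if_neg h0, if_neg h1, if_neg h2, if_neg h3, if_neg h4, if_neg h5, if_neg h6, if_neg h7,
        if_neg h8, getSquareList_alt, if_neg (by omega)]
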